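-- pv_equiv track=rewrite | github.com/JoseeJimenez/scrapy_pa | alkosto_project/alkosto_project/spiders/compuworking.py | categorizar
-- ===== SOURCE A (Python) =====
-- def categorizar(nombre, enlace, categoria_url):
--     """Categorización inteligente"""
--     texto = (str(nombre) + ' ' + str(enlace or '')).lower()
--
--     # Prioridad 1: Móviles y Tablets
--     if 'celulares' in categoria_url or 'tablets' in categoria_url:
--         if any(k in texto for k in ['tablet', 'tableta', 'ipad']):
--             return 'tablets'
--         elif any(k in texto for k in ['celular', 'smartphone', 'iphone', 'telefono', 'teléfono', 'moto', 'galaxy', 'xiaomi', 'realme', 'vivo', 'oppo']):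
--             return 'celulares'
--         else:
--             return 'celulares'
--
--     # Prioridad 2: Televisores
--     elif 'televisores' in categoria_url:
--         return 'pantallas'
--
--     # Prioridad 3: Audio
--     elif 'audio' in categoria_url:
--         return 'audio'
--
--     # Prioridad 4: Consolas
--     elif 'consolas' in categoria_url or 'gamer' in categoria_url:
--         return 'consolas'
--
--     # Prioridad 5: Computadores y Portátiles
--     elif 'computadores' in categoria_url or 'portatiles' in categoria_url:
--         if any(k in texto for k in ['portátil', 'laptop', 'notebook']):
--             return 'portatiles'
--         else:
--             return 'computadores'
--
--     # Prioridad 6: Accesorios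
--     elif 'accesorios' in categoria_url or 'mouse' in categoria_url:
--         if any(k in texto for k in ['mouse', 'teclado']):
--             return 'mouse_teclado'
--         else:
--             return 'accesorios_pc'
--
--     # Fallback
--     return 'otros'
-- ===== SOURCE B (Python) =====
-- # priority number of each url keyword (lower = higher priority)
-- URL_KW = [('celulares', 1), ('tablets', 1), ('televisores', 2), ('audio', 3),
--           ('consolas', 4), ('gamer', 4), ('computadores', 5), ('portatiles', 5),
--           ('accesorios', 6), ('mouse', 6)]
--
-- # per group: (text keywords, category if a text keyword hits, category otherwise)
-- GROUPS = {1: (('tablet', 'tableta', 'ipad'), 'tablets', 'celulares'),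
--           2: ((), '', 'pantallas'),
--           3: ((), '', 'audio'),
--           4: ((), '', 'consolas'),
--           5: (('portátil', 'laptop', 'notebook'), 'portatiles', 'computadores'),
--           6: (('mouse', 'teclado'), 'mouse_teclado', 'accesorios_pc')}
--
-- def categorizar(nombre, enlace, categoria_url):
--     texto = (str(nombre) + ' ' + str(enlace or '')).lower()
--     g = min((p for k, p in URL_KW if k in categoria_url), default=0)
--     keys, hit, miss = GROUPS.get(g, ((), '', 'otros'))
--     return hit if any(k in texto for k in keys) else miss
-- ===== Notes on version B (the rewrite author's own statement) =====
-- stated objective: alternative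
-- what changed: Instead of A's ordered first-match if/elif cascade, B collects the priority numbers of every url keyword present in categoria_url from a flat keyword->priority table, takes the minimum priority (default 0), and maps that group number through a lookup table of (text keywords, category-on-hit, category-on-miss) to the result.
import Mathlib
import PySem

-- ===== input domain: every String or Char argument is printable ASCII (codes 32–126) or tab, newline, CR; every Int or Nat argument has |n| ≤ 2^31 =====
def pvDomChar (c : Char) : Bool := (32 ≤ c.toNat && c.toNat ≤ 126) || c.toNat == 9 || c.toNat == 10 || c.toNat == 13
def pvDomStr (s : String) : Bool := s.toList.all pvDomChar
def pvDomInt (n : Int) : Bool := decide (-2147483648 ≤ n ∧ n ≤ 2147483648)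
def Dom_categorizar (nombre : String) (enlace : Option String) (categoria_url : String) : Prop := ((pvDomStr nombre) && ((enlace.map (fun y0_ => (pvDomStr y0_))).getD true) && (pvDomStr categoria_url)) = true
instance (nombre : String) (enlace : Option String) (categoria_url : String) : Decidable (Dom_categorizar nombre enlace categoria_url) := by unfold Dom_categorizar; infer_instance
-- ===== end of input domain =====

-- B replaces A's first-match if/elif cascade by a two-stage computation: collect the
-- priority numbers of ALL matching url keywords, take their minimum, and resolve that
-- group via a lookup table (objective: alternative); same return value on every input.

-- ===== PORT A =====
-- literal transliteration of A's if/elif chain ('x or ""' on an Option string = getD "")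
def categorizar (nombre : String) (enlace : Option String) (categoria_url : String) : String :=
  let texto := PySem.Str.lower (nombre ++ " " ++ enlace.getD "")
  if PySem.Str.isIn "celulares" categoria_url || PySem.Str.isIn "tablets" categoria_url then
    if (["tablet", "tableta", "ipad"] : List String).any (fun k => PySem.Str.isIn k texto) then
      "tablets"
    else if (["celular", "smartphone", "iphone", "telefono", "teléfono", "moto", "galaxy",
             "xiaomi", "realme", "vivo", "oppo"] : List String).any
             (fun k => PySem.Str.isIn k texto) then
      "celulares"
    else
      "celulares"
  else if PySem.Str.isIn "televisores" categoria_url then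
    "pantallas"
  else if PySem.Str.isIn "audio" categoria_url then
    "audio"
  else if PySem.Str.isIn "consolas" categoria_url || PySem.Str.isIn "gamer" categoria_url then
    "consolas"
  else if PySem.Str.isIn "computadores" categoria_url || PySem.Str.isIn "portatiles" categoria_url then
    if (["portátil", "laptop", "notebook"] : List String).any (fun k => PySem.Str.isIn k texto) then
      "portatiles"
    else
      "computadores"
  else if PySem.Str.isIn "accesorios" categoria_url || PySem.Str.isIn "mouse" categoria_url then
    if (["mouse", "teclado"] : List String).any (fun k => PySem.Str.isIn k texto) then
      "mouse_teclado"
    else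
      "accesorios_pc"
  else
    "otros"

-- ===== PORT B =====
-- priority number of each url keyword (lower = higher priority)
def pvUrlKw : List (String × Int) :=
  [("celulares", 1), ("tablets", 1), ("televisores", 2), ("audio", 3),
   ("consolas", 4), ("gamer", 4), ("computadores", 5), ("portatiles", 5),
   ("accesorios", 6), ("mouse", 6)]

-- per group: (text keywords, category if a text keyword hits, category otherwise);
-- GROUPS.get(g, ((), '', 'otros')) as a total lookup
def pvGroups (g : Int) : List String × String × String :=
  if g = 1 then (["tablet", "tableta", "ipad"], "tablets", "celulares")
  else if g = 2 then ([], "", "pantallas")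
  else if g = 3 then ([], "", "audio")
  else if g = 4 then ([], "", "consolas")
  else if g = 5 then (["portátil", "laptop", "notebook"], "portatiles", "computadores")
  else if g = 6 then (["mouse", "teclado"], "mouse_teclado", "accesorios_pc")
  else ([], "", "otros")

def categorizar_alt (nombre : String) (enlace : Option String) (categoria_url : String) : String :=
  let texto := PySem.Str.lower (nombre ++ " " ++ enlace.getD "")
  let prios := ((pvUrlKw.filter (fun kp => PySem.Str.isIn kp.1 categoria_url)).map (·.2))
  let g := (PySem.List.min? prios (fun x => x)).getD 0
  let r := pvGroups g
  if r.1.any (fun k => PySem.Str.isIn k texto) then r.2.1 else r.2.2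

-- ===== PRECONDITION & SPEC =====
def Spec_categorizar (nombre : String) (enlace : Option String) (categoria_url : String) (out : String) : Prop := out = categorizar_alt nombre enlace categoria_url
instance (nombre : String) (enlace : Option String) (categoria_url : String) (out : String) : Decidable (Spec_categorizar nombre enlace categoria_url out) := by unfold Spec_categorizar; infer_instance

-- ===== CLAIM (what is proved, stated in full; the proofs are below) =====
def Claim_equal_categorizar : Prop := ∀ (nombre : String) (enlace : Option String) (categoria_url : String), Dom_categorizar nombre enlace categoria_url → Spec_categorizar nombre enlace categoria_url (categorizar nombre enlace categoria_url)

-- ===== LEMMAS AND PROOFS =====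


-- helpers for the proof: the list of matched priorities, and its characterisation
def pvPrios (u : String) : List Int :=
  List.map (fun x => x.2) (List.filter (fun kp => PySem.Str.isIn kp.1 u) pvUrlKw)

lemma pvMinGetD (l : List Int) (k : Int) (hmem : k ∈ l) (hge : ∀ y ∈ l, k ≤ y) :
    (PySem.List.min? l (fun x => x)).getD 0 = k := by
  cases hl : PySem.List.min? l (fun x => x) with
  | none => rw [PySem.List.min?_eq_none_iff] at hl; subst hl; simp at hmem
  | some m =>
    simp only [Option.getD_some]
    exact le_antisymm (PySem.List.min?_isMin hl k hmem) (hge m (PySem.List.min?_mem hl))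

lemma mem_pvPrios (u : String) (y : Int) :
    y ∈ pvPrios u ↔ ((PySem.Str.isIn "celulares" u = true ∧ y = 1) ∨ (PySem.Str.isIn "tablets" u = true ∧ y = 1) ∨ (PySem.Str.isIn "televisores" u = true ∧ y = 2) ∨ (PySem.Str.isIn "audio" u = true ∧ y = 3) ∨ (PySem.Str.isIn "consolas" u = true ∧ y = 4) ∨ (PySem.Str.isIn "gamer" u = true ∧ y = 4) ∨ (PySem.Str.isIn "computadores" u = true ∧ y = 5) ∨ (PySem.Str.isIn "portatiles" u = true ∧ y = 5) ∨ (PySem.Str.isIn "accesorios" u = true ∧ y = 6) ∨ (PySem.Str.isIn "mouse" u = true ∧ y = 6)) := by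
  constructor
  · intro hy
    obtain ⟨ab, hf, hsnd⟩ := List.mem_map.mp hy
    obtain ⟨hmem, hflag⟩ := List.mem_filter.mp hf
    simp only [pvUrlKw, List.mem_cons, List.not_mem_nil, or_false] at hmem
    subst hsnd
    rcases hmem with rfl|rfl|rfl|rfl|rfl|rfl|rfl|rfl|rfl|rfl
    · exact Or.inl ⟨hflag, rfl⟩
    · exact Or.inr (Or.inl ⟨hflag, rfl⟩)
    · exact Or.inr (Or.inr (Or.inl ⟨hflag, rfl⟩))
    · exact Or.inr (Or.inr (Or.inr (Or.inl ⟨hflag, rfl⟩)))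
    · exact Or.inr (Or.inr (Or.inr (Or.inr (Or.inl ⟨hflag, rfl⟩))))
    · exact Or.inr (Or.inr (Or.inr (Or.inr (Or.inr (Or.inl ⟨hflag, rfl⟩)))))
    · exact Or.inr (Or.inr (Or.inr (Or.inr (Or.inr (Or.inr (Or.inl ⟨hflag, rfl⟩))))))
    · exact Or.inr (Or.inr (Or.inr (Or.inr (Or.inr (Or.inr (Or.inr (Or.inl ⟨hflag, rfl⟩)))))))
    · exact Or.inr (Or.inr (Or.inr (Or.inr (Or.inr (Or.inr (Or.inr (Or.inr (Or.inl ⟨hflag, rfl⟩))))))))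
    · exact Or.inr (Or.inr (Or.inr (Or.inr (Or.inr (Or.inr (Or.inr (Or.inr (Or.inr (⟨hflag, rfl⟩)))))))))
  · intro h
    rcases h with ⟨hf,rfl⟩|⟨hf,rfl⟩|⟨hf,rfl⟩|⟨hf,rfl⟩|⟨hf,rfl⟩|⟨hf,rfl⟩|⟨hf,rfl⟩|⟨hf,rfl⟩|⟨hf,rfl⟩|⟨hf,rfl⟩
    · exact List.mem_map.mpr ⟨("celulares", 1), List.mem_filter.mpr ⟨by simp [pvUrlKw], hf⟩, rfl⟩
    · exact List.mem_map.mpr ⟨("tablets", 1), List.mem_filter.mpr ⟨by simp [pvUrlKw], hf⟩, rfl⟩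
    · exact List.mem_map.mpr ⟨("televisores", 2), List.mem_filter.mpr ⟨by simp [pvUrlKw], hf⟩, rfl⟩
    · exact List.mem_map.mpr ⟨("audio", 3), List.mem_filter.mpr ⟨by simp [pvUrlKw], hf⟩, rfl⟩
    · exact List.mem_map.mpr ⟨("consolas", 4), List.mem_filter.mpr ⟨by simp [pvUrlKw], hf⟩, rfl⟩
    · exact List.mem_map.mpr ⟨("gamer", 4), List.mem_filter.mpr ⟨by simp [pvUrlKw], hf⟩, rfl⟩
    · exact List.mem_map.mpr ⟨("computadores", 5), List.mem_filter.mpr ⟨by simp [pvUrlKw], hf⟩, rfl⟩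
    · exact List.mem_map.mpr ⟨("portatiles", 5), List.mem_filter.mpr ⟨by simp [pvUrlKw], hf⟩, rfl⟩
    · exact List.mem_map.mpr ⟨("accesorios", 6), List.mem_filter.mpr ⟨by simp [pvUrlKw], hf⟩, rfl⟩
    · exact List.mem_map.mpr ⟨("mouse", 6), List.mem_filter.mpr ⟨by simp [pvUrlKw], hf⟩, rfl⟩

-- ===== VERDICT (by name: the statement is the Claim_ definition above) =====
theorem categorizar_spec : Claim_equal_categorizar := by
  intro nombre enlace categoria_url hdom
  clear hdom
  unfold Spec_categorizar categorizar categorizar_alt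
  show _ = (have texto := PySem.Str.lower (nombre ++ " " ++ enlace.getD "");
    have g := (PySem.List.min? (pvPrios categoria_url) fun x => x).getD 0;
    have r := pvGroups g;
    if (r.1.any fun k => PySem.Str.isIn k texto) = true then r.2.1 else r.2.2)
  by_cases h1 : (PySem.Str.isIn "celulares" categoria_url || PySem.Str.isIn "tablets" categoria_url) = true
  · have hg : (PySem.List.min? (pvPrios categoria_url) fun x => x).getD 0 = 1 := by
      refine pvMinGetD _ 1 ?_ ?_
      · rcases Bool.or_eq_true_iff.mp h1 with hc | hc
        · exact (mem_pvPrios _ 1).mpr (Or.inl ⟨hc, rfl⟩)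
        · exact (mem_pvPrios _ 1).mpr (Or.inr (Or.inl ⟨hc, rfl⟩))
      · intro y hy
        rcases (mem_pvPrios _ y).mp hy with ⟨h,rfl⟩|⟨h,rfl⟩|⟨h,rfl⟩|⟨h,rfl⟩|⟨h,rfl⟩|⟨h,rfl⟩|⟨h,rfl⟩|⟨h,rfl⟩|⟨h,rfl⟩|⟨h,rfl⟩ <;> omega
    simp only [hg]
    clear hg
    simp_all [pvGroups, ite_self]
  · simp only [Bool.or_eq_true_iff, not_or, Bool.not_eq_true] at h1
    obtain ⟨f_celulares, f_tablets⟩ := h1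
    by_cases h2 : PySem.Str.isIn "televisores" categoria_url = true
    · have hg : (PySem.List.min? (pvPrios categoria_url) fun x => x).getD 0 = 2 := by
        refine pvMinGetD _ 2 ?_ ?_
        · exact (mem_pvPrios _ 2).mpr (Or.inr (Or.inr (Or.inl ⟨h2, rfl⟩)))
        · intro y hy
          rcases (mem_pvPrios _ y).mp hy with ⟨h,rfl⟩|⟨h,rfl⟩|⟨h,rfl⟩|⟨h,rfl⟩|⟨h,rfl⟩|⟨h,rfl⟩|⟨h,rfl⟩|⟨h,rfl⟩|⟨h,rfl⟩|⟨h,rfl⟩ <;> first | omega | (simp only [f_celulares, f_tablets] at h; exact Bool.noConfusion h)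
      simp only [hg]
      clear hg
      simp_all [pvGroups, ite_self]
    · rw [Bool.not_eq_true] at h2
      by_cases h3 : PySem.Str.isIn "audio" categoria_url = true
      · have hg : (PySem.List.min? (pvPrios categoria_url) fun x => x).getD 0 = 3 := by
          refine pvMinGetD _ 3 ?_ ?_
          · exact (mem_pvPrios _ 3).mpr (Or.inr (Or.inr (Or.inr (Or.inl ⟨h3, rfl⟩))))
          · intro y hy
            rcases (mem_pvPrios _ y).mp hy with ⟨h,rfl⟩|⟨h,rfl⟩|⟨h,rfl⟩|⟨h,rfl⟩|⟨h,rfl⟩|⟨h,rfl⟩|⟨h,rfl⟩|⟨h,rfl⟩|⟨h,rfl⟩|⟨h,rfl⟩ <;> first | omega | (simp only [f_celulares, f_tablets, h2] at h; exact Bool.noConfusion h)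
        simp only [hg]
        clear hg
        simp_all [pvGroups, ite_self]
      · rw [Bool.not_eq_true] at h3
        by_cases h4 : (PySem.Str.isIn "consolas" categoria_url || PySem.Str.isIn "gamer" categoria_url) = true
        · have hg : (PySem.List.min? (pvPrios categoria_url) fun x => x).getD 0 = 4 := by
            refine pvMinGetD _ 4 ?_ ?_
            · rcases Bool.or_eq_true_iff.mp h4 with hc | hc
              · exact (mem_pvPrios _ 4).mpr (Or.inr (Or.inr (Or.inr (Or.inr (Or.inl ⟨hc, rfl⟩)))))
              · exact (mem_pvPrios _ 4).mpr (Or.inr (Or.inr (Or.inr (Or.inr (Or.inr (Or.inl ⟨hc, rfl⟩))))))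
            · intro y hy
              rcases (mem_pvPrios _ y).mp hy with ⟨h,rfl⟩|⟨h,rfl⟩|⟨h,rfl⟩|⟨h,rfl⟩|⟨h,rfl⟩|⟨h,rfl⟩|⟨h,rfl⟩|⟨h,rfl⟩|⟨h,rfl⟩|⟨h,rfl⟩ <;> first | omega | (simp only [f_celulares, f_tablets, h2, h3] at h; exact Bool.noConfusion h)
          simp only [hg]
          clear hg
          simp_all [pvGroups, ite_self]
        · simp only [Bool.or_eq_true_iff, not_or, Bool.not_eq_true] at h4
          obtain ⟨f_consolas, f_gamer⟩ := h4
          by_cases h5 : (PySem.Str.isIn "computadores" categoria_url || PySem.Str.isIn "portatiles" categoria_url) = true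
          · have hg : (PySem.List.min? (pvPrios categoria_url) fun x => x).getD 0 = 5 := by
              refine pvMinGetD _ 5 ?_ ?_
              · rcases Bool.or_eq_true_iff.mp h5 with hc | hc
                · exact (mem_pvPrios _ 5).mpr (Or.inr (Or.inr (Or.inr (Or.inr (Or.inr (Or.inr (Or.inl ⟨hc, rfl⟩)))))))
                · exact (mem_pvPrios _ 5).mpr (Or.inr (Or.inr (Or.inr (Or.inr (Or.inr (Or.inr (Or.inr (Or.inl ⟨hc, rfl⟩))))))))
              · intro y hy
                rcases (mem_pvPrios _ y).mp hy with ⟨h,rfl⟩|⟨h,rfl⟩|⟨h,rfl⟩|⟨h,rfl⟩|⟨h,rfl⟩|⟨h,rfl⟩|⟨h,rfl⟩|⟨h,rfl⟩|⟨h,rfl⟩|⟨h,rfl⟩ <;> first | omega | (simp only [f_celulares, f_tablets, h2, h3, f_consolas, f_gamer] at h; exact Bool.noConfusion h)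
            simp only [hg]
            clear hg
            simp_all [pvGroups, ite_self]
          · simp only [Bool.or_eq_true_iff, not_or, Bool.not_eq_true] at h5
            obtain ⟨f_computadores, f_portatiles⟩ := h5
            by_cases h6 : (PySem.Str.isIn "accesorios" categoria_url || PySem.Str.isIn "mouse" categoria_url) = true
            · have hg : (PySem.List.min? (pvPrios categoria_url) fun x => x).getD 0 = 6 := by
                refine pvMinGetD _ 6 ?_ ?_
                · rcases Bool.or_eq_true_iff.mp h6 with hc | hc
                  · exact (mem_pvPrios _ 6).mpr (Or.inr (Or.inr (Or.inr (Or.inr (Or.inr (Or.inr (Or.inr (Or.inr (Or.inl ⟨hc, rfl⟩)))))))))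
                  · exact (mem_pvPrios _ 6).mpr (Or.inr (Or.inr (Or.inr (Or.inr (Or.inr (Or.inr (Or.inr (Or.inr (Or.inr (⟨hc, rfl⟩))))))))))
                · intro y hy
                  rcases (mem_pvPrios _ y).mp hy with ⟨h,rfl⟩|⟨h,rfl⟩|⟨h,rfl⟩|⟨h,rfl⟩|⟨h,rfl⟩|⟨h,rfl⟩|⟨h,rfl⟩|⟨h,rfl⟩|⟨h,rfl⟩|⟨h,rfl⟩ <;> first | omega | (simp only [f_celulares, f_tablets, h2, h3, f_consolas, f_gamer, f_computadores, f_portatiles] at h; exact Bool.noConfusion h)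
              simp only [hg]
              clear hg
              simp_all [pvGroups, ite_self]
            · simp only [Bool.or_eq_true_iff, not_or, Bool.not_eq_true] at h6
              obtain ⟨f_accesorios, f_mouse⟩ := h6
              have hnil : pvPrios categoria_url = [] := by
                rcases hn : pvPrios categoria_url with _ | ⟨y, t⟩
                · rfl
                · exfalso
                  have hy : y ∈ pvPrios categoria_url := by rw [hn]; exact List.mem_cons_self ..
                  rcases (mem_pvPrios _ y).mp hy with ⟨h,_⟩|⟨h,_⟩|⟨h,_⟩|⟨h,_⟩|⟨h,_⟩|⟨h,_⟩|⟨h,_⟩|⟨h,_⟩|⟨h,_⟩|⟨h,_⟩ <;>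
                    (simp only [f_celulares, f_tablets, h2, h3, f_consolas, f_gamer, f_computadores, f_portatiles, f_accesorios, f_mouse] at h; exact Bool.noConfusion h)
              have hg : (PySem.List.min? (pvPrios categoria_url) fun x => x).getD 0 = 0 := by rw [hnil]; rfl
              simp only [hg]
              clear hg
              simp_all [pvGroups]
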